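-- pv_equiv track=rewrite | github.com/linhdvu14/cp-sols | sols/CodeForces/1598_edu/C_Delete_Two_Elements.py | solve
-- ===== SOURCE A (Python) =====
-- def solve(N, nums):
-- 	target, rem = divmod(2*sum(nums), N)
-- 	if rem != 0: return 0
-- 	res = 0
-- 	cnt = {}
-- 	for num in nums:
-- 		res += cnt.get(target-num, 0)
-- 		cnt[num] = cnt.get(num, 0) + 1
-- 	return res
-- ===== SOURCE B (Python) =====
-- def solve(N, nums):
-- 	target, rem = divmod(2*sum(nums), N)
-- 	if rem != 0: return 0
-- 	cnt = {}
-- 	for num in nums: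
-- 		cnt[num] = cnt.get(num, 0) + 1
-- 	total = 0
-- 	for v, c in cnt.items():
-- 		w = target - v
-- 		if v < w:
-- 			total += c * cnt.get(w, 0)
-- 		elif v == w:
-- 			total += c * (c - 1) // 2
-- 	return total
-- ===== Notes on version B (the rewrite author's own statement) =====
-- stated objective: alternative
-- what changed: B first builds a complete frequency dict in one pass and then sums over the distinct values, counting cross pairs once via a v < target-v guard and self pairs via c*(c-1)//2, instead of A's running prefix-count accumulation per element.
import Mathlib
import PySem

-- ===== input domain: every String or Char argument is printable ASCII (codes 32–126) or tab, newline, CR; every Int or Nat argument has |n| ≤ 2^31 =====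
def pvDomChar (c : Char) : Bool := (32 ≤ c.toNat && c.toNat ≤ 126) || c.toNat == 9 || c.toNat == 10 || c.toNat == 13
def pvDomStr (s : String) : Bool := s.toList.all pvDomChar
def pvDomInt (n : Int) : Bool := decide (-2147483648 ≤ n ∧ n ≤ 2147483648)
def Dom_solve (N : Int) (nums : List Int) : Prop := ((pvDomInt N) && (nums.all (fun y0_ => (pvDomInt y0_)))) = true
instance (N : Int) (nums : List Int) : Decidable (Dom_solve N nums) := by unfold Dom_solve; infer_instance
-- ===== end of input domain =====

-- B builds the full frequency dict first and sums over distinct values (cross pairs once via v < target-v, self pairs via c*(c-1)//2) instead of A's running prefix-count accumulation; same O(n) cost, alternative algorithm.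


-- ===== PORT A =====
def solve (N : Int) (nums : List Int) : Int :=
  let target := PySem.Int.floordiv (2 * nums.sum) N
  let rem := PySem.Int.mod (2 * nums.sum) N
  if rem ≠ 0 then 0
  else
    (nums.foldl (fun (st : Int × PySem.Dict Int Int) num =>
        (st.1 + st.2.getD (target - num) 0, st.2.insert num (st.2.getD num 0 + 1)))
      (0, PySem.Dict.empty)).1

-- ===== PORT B =====
def solve_alt (N : Int) (nums : List Int) : Int :=
  let target := PySem.Int.floordiv (2 * nums.sum) N
  let rem := PySem.Int.mod (2 * nums.sum) N
  if rem ≠ 0 then 0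
  else
    let cnt := nums.foldl (fun (d : PySem.Dict Int Int) num => d.insert num (d.getD num 0 + 1))
      PySem.Dict.empty
    cnt.items.foldl (fun total vc =>
      let w := target - vc.1
      if vc.1 < w then total + vc.2 * cnt.getD w 0
      else if vc.1 = w then total + PySem.Int.floordiv (vc.2 * (vc.2 - 1)) 2
      else total) 0

-- ===== PRECONDITION & SPEC =====
-- Pre_ excludes only N = 0, where Python's divmod raises ZeroDivisionError.
def Pre_solve (N : Int) (nums : List Int) : Prop := N ≠ 0
instance (N : Int) (nums : List Int) : Decidable (Pre_solve N nums) := by unfold Pre_solve; infer_instance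
def pvWitness_solve : Int × List Int := (2, [1, 3])
def Spec_solve (N : Int) (nums : List Int) (out : Int) : Prop := out = solve_alt N nums
instance (N : Int) (nums : List Int) (out : Int) : Decidable (Spec_solve N nums out) := by unfold Spec_solve; infer_instance

-- ===== CLAIM (what is proved, stated in full; the proofs are below) =====
def Claim_equal_solve : Prop := ∀ (N : Int) (nums : List Int), Dom_solve N nums → Pre_solve N nums → Spec_solve N nums (solve N nums)

-- ===== LEMMAS AND PROOFS =====

-- the per-distinct-value summand of B, with counts abstracted as a function c
def pvTerm (t : Int) (c : Int → Int) (k : Int) : Int :=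
  if k < t - k then c k * c (t - k)
  else if k = t - k then PySem.Int.floordiv (c k * (c k - 1)) 2
  else 0

-- A's accumulated result over the remaining list l, after prefix p has been counted
def pvX (t : Int) (p l : List Int) : Int :=
  match l with
  | [] => 0
  | x :: l' => (p.count (t - x) : Int) + pvX t (p ++ [x]) l'

lemma pvX_append (t x : Int) (l : List Int) : ∀ p,
    pvX t p (l ++ [x]) = pvX t p l + ((p ++ l).count (t - x) : Int) := by
  induction l with
  | nil => intro p; simp [pvX]
  | cons y l' ih =>
      intro p
      simp only [List.cons_append, List.nil_append, pvX, ih (p ++ [y]), List.append_assoc]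
      ring

lemma pvA_fold (t : Int) (l : List Int) : ∀ (res : Int) (d : PySem.Dict Int Int) (p : List Int),
    (∀ v, d.getD v 0 = (p.count v : Int)) →
    (l.foldl (fun (st : Int × PySem.Dict Int Int) num =>
        (st.1 + st.2.getD (t - num) 0, st.2.insert num (st.2.getD num 0 + 1))) (res, d)).1
      = res + pvX t p l := by
  induction l with
  | nil => intro res d p _; simp [pvX]
  | cons x l' ih =>
      intro res d p hd
      simp only [List.foldl_cons, pvX]
      rw [ih (res + d.getD (t - x) 0) (d.insert x (d.getD x 0 + 1)) (p ++ [x])]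
      · rw [hd]; ring
      · intro v
        rw [PySem.Dict.getD_insert, hd]
        rw [hd]
        by_cases hv : v = x
        · subst hv; simp [List.count_append]
        · simp [hv, Ne.symm hv, List.count_append]

-- sum over a Nodup list of a pointwise change at one member
lemma pv_sum_one_point (f g : Int → Int) (a : Int) : ∀ (S : List Int), a ∈ S → S.Nodup →
    (∀ k ∈ S, k ≠ a → f k = g k) → (S.map f).sum = (S.map g).sum + (f a - g a) := by
  intro S
  induction S with
  | nil => intro h; cases h
  | cons y S' ih =>
      intro ha hnd hfg
      simp only [List.map_cons, List.sum_cons]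
      rcases List.mem_cons.mp ha with hy | hy
      · subst hy
        have : S'.map f = S'.map g := by
          apply List.map_congr_left
          intro k hk
          exact hfg k (List.mem_cons_of_mem _ hk) (fun h => (List.nodup_cons.mp hnd).1 (h ▸ hk))
        rw [this]; ring
      · have hy' : y ≠ a := fun h => (List.nodup_cons.mp hnd).1 (h ▸ hy)
        rw [hfg y (List.mem_cons_self) hy', ih hy (List.nodup_cons.mp hnd).2
          (fun k hk hka => hfg k (List.mem_cons_of_mem _ hk) hka)]
        ring

lemma pv_fdiv_succ (c : Int) :
    PySem.Int.floordiv ((c + 1) * c) 2 = PySem.Int.floordiv (c * (c - 1)) 2 + c := by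
  rw [PySem.Int.floordiv_eq_ediv_of_pos (by omega), PySem.Int.floordiv_eq_ediv_of_pos (by omega)]
  obtain ⟨k, hk⟩ : Even ((c - 1) * ((c - 1) + 1)) := Int.even_mul_succ_self _
  have h1 : c * (c - 1) = 2 * k := by linear_combination hk
  have h2 : (c + 1) * c = 2 * (k + c) := by linear_combination hk
  rw [h1, h2, Int.mul_ediv_cancel_left _ (by norm_num), Int.mul_ediv_cancel_left _ (by norm_num)]

-- one right-extension step for B's sum over distinct values
lemma pvG_step (t x : Int) (l : List Int) :
    ((PySem.Set.ofList (l ++ [x])).map (pvTerm t (fun v => ((l ++ [x]).count v : Int)))).sum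
      = ((PySem.Set.ofList l).map (pvTerm t (fun v => (l.count v : Int)))).sum
        + (l.count (t - x) : Int) := by
  rw [PySem.Set.ofList_append_singleton]
  set S := PySem.Set.ofList l with hS
  set c : Int → Int := fun v => (l.count v : Int) with hc
  set c' : Int → Int := fun v => ((l ++ [x]).count v : Int) with hc'
  have hnd : S.Nodup := PySem.Set.nodup_ofList l
  have hmem : ∀ v : Int, v ∈ S ↔ v ∈ l := fun v => PySem.Set.mem_ofList l v
  have hcc' : ∀ v, v ≠ x → c' v = c v := by
    intro v hv
    simp [hc', hc, List.count_append, Ne.symm hv]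
  have hc'x : c' x = c x + 1 := by
    simp [hc', hc, List.count_append]
  have hterm_ne : ∀ k, k ≠ x → k ≠ t - x → pvTerm t c' k = pvTerm t c k := by
    intro k hk1 hk2
    unfold pvTerm
    rw [hcc' k hk1, hcc' (t - k) (by omega)]
  have hc0 : x ∉ S → c x = 0 := by
    intro hx
    simp only [hc, Int.natCast_eq_zero, List.count_eq_zero]
    exact fun h => hx ((hmem x).mpr h)
  have hctx0 : (t - x) ∉ S → c (t - x) = 0 := by
    intro hx
    simp only [hc, Int.natCast_eq_zero, List.count_eq_zero]
    exact fun h => hx ((hmem _).mpr h)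
  rcases lt_trichotomy x (t - x) with hlt | heq | hgt
  · -- x < t - x : only the summand at x changes
    have hag : ∀ k ∈ S, k ≠ x → pvTerm t c' k = pvTerm t c k := by
      intro k _ hk
      by_cases hk2 : k = t - x
      · subst hk2
        unfold pvTerm
        rw [if_neg (by omega), if_neg (by omega), if_neg (by omega), if_neg (by omega)]
      · exact hterm_ne k hk hk2
    have hdx : pvTerm t c' x = pvTerm t c x + c (t - x) := by
      unfold pvTerm
      rw [if_pos hlt, if_pos hlt, hc'x, hcc' (t - x) (by omega)]
      ring
    by_cases hx : x ∈ S
    · rw [PySem.Set.add_of_mem hx,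
        pv_sum_one_point (pvTerm t c') (pvTerm t c) x S hx hnd hag, hdx]
      ring
    · have hzero : pvTerm t c x = 0 := by
        unfold pvTerm
        rw [if_pos hlt, hc0 hx]
        ring
      rw [PySem.Set.add_of_not_mem hx, List.map_append,
        List.map_congr_left (fun k hk => hag k hk (fun h => hx (h ▸ hk))), List.sum_append]
      simp only [List.map_cons, List.map_nil, List.sum_cons, List.sum_nil, add_zero]
      rw [hdx, hzero]
      ring
  · -- x = t - x : only the summand at x changes, by pv_fdiv_succ
    have hag : ∀ k ∈ S, k ≠ x → pvTerm t c' k = pvTerm t c k := by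
      intro k _ hk
      exact hterm_ne k hk (by omega)
    have hdx : pvTerm t c' x = pvTerm t c x + c (t - x) := by
      unfold pvTerm
      rw [if_neg (show ¬ x < t - x by omega), if_neg (show ¬ x < t - x by omega),
        if_pos heq, if_pos heq, hc'x, ← heq]
      have := pv_fdiv_succ (c x)
      have harg : (c x + 1) * (c x + 1 - 1) = (c x + 1) * c x := by ring
      rw [harg, this]
    by_cases hx : x ∈ S
    · rw [PySem.Set.add_of_mem hx,
        pv_sum_one_point (pvTerm t c') (pvTerm t c) x S hx hnd hag, hdx]
      ring
    · have hzero : pvTerm t c x = 0 := by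
        unfold pvTerm
        have h0 : c x * (c x - 1) = 0 := by rw [hc0 hx]; ring
        rw [if_neg (show ¬ x < t - x by omega), if_pos heq, h0,
          PySem.Int.floordiv_eq_ediv_of_pos (by norm_num)]
        norm_num
      rw [PySem.Set.add_of_not_mem hx, List.map_append,
        List.map_congr_left (fun k hk => hag k hk (fun h => hx (h ▸ hk))), List.sum_append]
      simp only [List.map_cons, List.map_nil, List.sum_cons, List.sum_nil, add_zero]
      rw [hdx, hzero]
      ring
  · -- t - x < x : only the summand at t - x changes; the new key x contributes 0
    have hag : ∀ k ∈ S, k ≠ t - x → pvTerm t c' k = pvTerm t c k := by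
      intro k _ hk
      by_cases hk1 : k = x
      · subst hk1
        unfold pvTerm
        rw [if_neg (by omega), if_neg (by omega), if_neg (by omega), if_neg (by omega)]
      · exact hterm_ne k hk1 hk
    have hdx : pvTerm t c' (t - x) = pvTerm t c (t - x) + c (t - x) := by
      unfold pvTerm
      have htt : t - (t - x) = x := by omega
      rw [if_pos (by omega), if_pos (by omega), htt, hc'x,
        hcc' (t - x) (by omega)]
      ring
    have hfx : pvTerm t c' x = 0 := by
      unfold pvTerm
      rw [if_neg (show ¬ x < t - x by omega), if_neg (show ¬ x = t - x by omega)]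
    by_cases hx' : (t - x) ∈ S
    · have hsum := pv_sum_one_point (pvTerm t c') (pvTerm t c) (t - x) S hx' hnd hag
      by_cases hx : x ∈ S
      · rw [PySem.Set.add_of_mem hx, hsum, hdx]; ring
      · rw [PySem.Set.add_of_not_mem hx, List.map_append, List.sum_append, hsum, hdx]
        simp only [List.map_cons, List.map_nil, List.sum_cons, List.sum_nil, add_zero]
        rw [hfx]
        ring
    · have hmaps : S.map (pvTerm t c') = S.map (pvTerm t c) :=
        List.map_congr_left (fun k hk => hag k hk (fun h => hx' (h ▸ hk)))
      have h0 : ((List.count (t - x) l : Int)) = 0 := by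
        have h := hctx0 hx'
        simpa only [hc] using h
      by_cases hx : x ∈ S
      · rw [PySem.Set.add_of_mem hx, hmaps, h0]
        ring
      · rw [PySem.Set.add_of_not_mem hx, List.map_append, List.sum_append, hmaps, h0]
        simp only [List.map_cons, List.map_nil, List.sum_cons, List.sum_nil, add_zero]
        rw [hfx]
        ring

lemma pvB_fold (t : Int) (cnt : PySem.Dict Int Int) :
    cnt.items.foldl (fun total vc =>
      let w := t - vc.1
      if vc.1 < w then total + vc.2 * cnt.getD w 0
      else if vc.1 = w then total + PySem.Int.floordiv (vc.2 * (vc.2 - 1)) 2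
      else total) 0
    = (cnt.items.map (fun vc =>
        if vc.1 < t - vc.1 then vc.2 * cnt.getD (t - vc.1) 0
        else if vc.1 = t - vc.1 then PySem.Int.floordiv (vc.2 * (vc.2 - 1)) 2
        else 0)).sum := by
  have hfun : (fun (total : Int) (vc : Int × Int) =>
      let w := t - vc.1
      if vc.1 < w then total + vc.2 * cnt.getD w 0
      else if vc.1 = w then total + PySem.Int.floordiv (vc.2 * (vc.2 - 1)) 2
      else total)
    = (fun total vc => total +
        (if vc.1 < t - vc.1 then vc.2 * cnt.getD (t - vc.1) 0
         else if vc.1 = t - vc.1 then PySem.Int.floordiv (vc.2 * (vc.2 - 1)) 2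
         else 0)) := by
    funext total vc
    dsimp only
    split_ifs <;> simp
  rw [hfun, PySem.List.foldl_add]
  simp

lemma pvB_sum (t : Int) (l : List Int) :
    ((PySem.Set.ofList l).map (pvTerm t (fun v => (l.count v : Int)))).sum = pvX t [] l := by
  induction l using List.reverseRecOn with
  | nil => simp [pvX]
  | append_singleton l x ih =>
      rw [pvG_step, ih, pvX_append]
      simp

-- ===== VERDICT (by name: the statement is the Claim_ definition above) =====
theorem solve_spec : Claim_equal_solve := by
  intro N nums _ hpre
  unfold Spec_solve solve solve_alt
  by_cases hr : PySem.Int.mod (2 * nums.sum) N ≠ 0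
  · rw [if_pos hr, if_pos hr]
  · rw [if_neg hr, if_neg hr]
    rw [pvA_fold (PySem.Int.floordiv (2 * nums.sum) N) nums 0 PySem.Dict.empty []
        (by intro v; simp [PySem.Dict.getD_empty])]
    rw [PySem.Dict.foldl_insert_getD_add_one_eq_counter, pvB_fold, PySem.Dict.items_counter,
      List.map_map, zero_add, ← pvB_sum (PySem.Int.floordiv (2 * nums.sum) N) nums]
    apply congrArg List.sum
    apply List.map_congr_left
    intro k _
    simp [pvTerm, PySem.Dict.getD_counter, Function.comp]
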